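-- pv_equiv track=rewrite | github.com/ChangxingJiang/OJ-Practice | 0501-0600/0555/0555_Python_1.py | splitLoopedString
-- ===== SOURCE A (Python) =====
-- from typing import List
--
-- def splitLoopedString(strs: List[str]) -> str:
--     lst = []
--     for s in strs:
--         if s > s[::-1]:
--             lst.append(s)
--         else:
--             lst.append(s[::-1])
--
--     ans = "".join(lst)
--
--     for i, s in enumerate(lst):
--         other = "".join(lst[i + 1:] + lst[:i])
--         for j in range(len(s)):
--             head = s[j:]
--             tail = s[:j]
--             ans = max(ans, head + other + tail, tail[::-1] + other + head[::-1])
--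
--     return ans
-- ===== SOURCE B (Python) =====
-- from typing import List
--
--
-- def _rot(t: str) -> str:
--     return t[1:] + t[:1]
--
--
-- def splitLoopedString(strs: List[str]) -> str:
--     lst = [s if s > s[::-1] else s[::-1] for s in strs]
--     ans = "".join(lst)
--     for i, s in enumerate(lst):
--         other = "".join(lst[i + 1:]) + "".join(lst[:i])
--         r = s[::-1]
--         f = s + other
--         b = r[1:] + other + r[:1]
--         for _ in range(len(s)):
--             if f > ans:
--                 ans = f
--             if b > ans:
--                 ans = b
--             f = _rot(f)
--             b = _rot(b)
--     return ans
-- ===== Notes on version B (the rewrite author's own statement) =====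
-- stated objective: alternative
-- what changed: B builds each rotation candidate incrementally by a rotate-one-character step applied to two running strings (forward and reversed orientation, the reversed one scanned in the opposite cut order), instead of A's fresh head/tail slicing and three-way max at every cut.
import Mathlib
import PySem

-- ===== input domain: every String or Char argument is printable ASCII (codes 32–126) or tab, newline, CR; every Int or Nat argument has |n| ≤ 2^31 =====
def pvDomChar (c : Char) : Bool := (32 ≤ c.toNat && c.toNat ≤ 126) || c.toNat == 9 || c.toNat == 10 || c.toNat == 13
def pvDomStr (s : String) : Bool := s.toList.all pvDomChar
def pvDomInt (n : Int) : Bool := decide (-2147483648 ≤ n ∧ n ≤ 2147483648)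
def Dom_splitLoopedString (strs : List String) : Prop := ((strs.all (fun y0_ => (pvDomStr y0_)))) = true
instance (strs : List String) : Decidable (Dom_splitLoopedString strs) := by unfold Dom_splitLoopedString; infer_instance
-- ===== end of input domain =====

-- B replaces A's per-cut string slicing by two running candidates advanced with a rotate-by-one step
-- (and scans the reversed orientation in the opposite cut order); objective: alternative, same results.

-- ===== PORT A =====
def splitLoopedString (strs : List String) : String :=
  -- lst = []; for s in strs: append s or s[::-1]
  let lst : List (List Char) := strs.foldl (fun acc s =>
      if s.toList.reverse < s.toList then acc ++ [s.toList] else acc ++ [s.toList.reverse]) []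
  -- ans = "".join(lst)
  let ans0 : List Char := PySem.Chars.join [] lst
  -- for i, s in enumerate(lst): …
  let ans : List Char := (PySem.List.enumerate lst).foldl (fun ans is =>
      let i := is.1
      let s := is.2
      let other := PySem.Chars.join []
        (PySem.List.slice lst (some (i + 1)) none ++ PySem.List.slice lst none (some i))
      (PySem.List.pyRange 0 (PySem.Chars.len s)).foldl (fun ans j =>
          let head := PySem.List.slice s (some j) none
          let tail := PySem.List.slice s none (some j)
          max (max ans (head ++ other ++ tail)) (tail.reverse ++ other ++ head.reverse)) ans) ans0
  String.ofList ans

-- ===== PORT B =====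
-- _rot(t) = t[1:] + t[:1]
def pvRot (t : List Char) : List Char :=
  PySem.List.slice t (some 1) none ++ PySem.List.slice t none (some 1)

def splitLoopedString_alt (strs : List String) : String :=
  let lst : List (List Char) := strs.map (fun s =>
      if s.toList.reverse < s.toList then s.toList else s.toList.reverse)
  let ans0 : List Char := PySem.Chars.join [] lst
  let ans : List Char := (PySem.List.enumerate lst).foldl (fun ans is =>
      let i := is.1
      let s := is.2
      let other := PySem.Chars.join [] (PySem.List.slice lst (some (i + 1)) none) ++
                   PySem.Chars.join [] (PySem.List.slice lst none (some i))
      let r := s.reverse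
      let f0 := s ++ other
      let b0 := PySem.List.slice r (some 1) none ++ other ++ PySem.List.slice r none (some 1)
      let st := (PySem.List.pyRange 0 (PySem.Chars.len s)).foldl (fun st _ =>
          let a := st.1
          let f := st.2.1
          let b := st.2.2
          let a1 := if a < f then f else a
          let a2 := if a1 < b then b else a1
          (a2, pvRot f, pvRot b)) (ans, f0, b0)
      st.1) ans0
  String.ofList ans

-- ===== PRECONDITION & SPEC =====
def Spec_splitLoopedString (strs : List String) (out : String) : Prop := out = splitLoopedString_alt strs
instance (strs : List String) (out : String) : Decidable (Spec_splitLoopedString strs out) := by unfold Spec_splitLoopedString; infer_instance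

-- ===== CLAIM (what is proved, stated in full; the proofs are below) =====
def Claim_equal_splitLoopedString : Prop := ∀ (strs : List String), Dom_splitLoopedString strs → Spec_splitLoopedString strs (splitLoopedString strs)

-- ===== LEMMAS AND PROOFS =====

set_option maxRecDepth 8192

-- the forward candidate at cut k: s[k:] + other + s[:k]
def pvF (s other : List Char) (k : Nat) : List Char := s.drop k ++ other ++ s.take k
-- the reversed-orientation candidate at cut k: s[:k][::-1] + other + s[k:][::-1]
def pvG (s other : List Char) (k : Nat) : List Char := (s.take k).reverse ++ other ++ (s.drop k).reverse

-- B's loop body once the two ifs are recognized as max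
def pvStepB (st : List Char × List Char × List Char) : List Char × List Char × List Char :=
  (max (max st.1 st.2.1) st.2.2, pvRot st.2.1, pvRot st.2.2)

theorem pv_if_max (a b : List Char) : (if a < b then b else a) = max a b := by
  by_cases h : a < b <;> simp [h, max_def_lt]

theorem pvRot_eq (t : List Char) : pvRot t = t.drop 1 ++ t.take 1 := by
  simp [pvRot, PySem.List.slice_from (a := 1) t (by norm_num),
        PySem.List.slice_to (b := 1) t (by norm_num)]

theorem pvRot_cons (x : Char) (xs : List Char) : pvRot (x :: xs) = xs ++ [x] := by
  rw [pvRot_eq]; simp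

theorem pv_join_nil (parts : List (List Char)) : PySem.Chars.join [] parts = parts.flatten := by
  induction parts with
  | nil => rfl
  | cons x t ih =>
      cases t with
      | nil => simp [PySem.Chars.join, List.intercalate]
      | cons y u =>
          simp only [PySem.Chars.join, List.intercalate] at ih ⊢
          simp_all [List.intersperse]

theorem pv_join_nil_append (xs ys : List (List Char)) :
    PySem.Chars.join [] (xs ++ ys) = PySem.Chars.join [] xs ++ PySem.Chars.join [] ys := by
  simp [pv_join_nil]

theorem pvRot_F (s other : List Char) {k : Nat} (hk : k < s.length) :
    pvRot (pvF s other k) = pvF s other (k + 1) := by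
  have hd : s.drop k = s[k] :: s.drop (k + 1) := List.drop_eq_getElem_cons hk
  have ht : s.take (k + 1) = s.take k ++ [s[k]] := by
    rw [List.take_add_one, List.getElem?_eq_getElem hk]; rfl
  rw [pvF, pvF, hd, ht]
  simp only [List.cons_append, pvRot_cons]
  simp [List.append_assoc]

theorem pvRot_G (s other : List Char) {j : Nat} (hj : j < s.length) :
    pvRot (pvG s other (j + 1)) = pvG s other j := by
  have ht : s.take (j + 1) = s.take j ++ [s[j]] := by
    rw [List.take_add_one, List.getElem?_eq_getElem hj]; rfl
  have hd : s.drop j = s[j] :: s.drop (j + 1) := List.drop_eq_getElem_cons hj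
  rw [pvG, pvG, ht, hd, List.reverse_append]
  simp only [List.reverse_cons]
  simp [pvRot_cons, List.append_assoc]

-- a fold that ignores its elements is an iterate
theorem pv_foldl_const {σ α : Type} (h : σ → σ) (l : List α) (init : σ) :
    l.foldl (fun st _ => h st) init = h^[l.length] init := by
  induction l generalizing init with
  | nil => rfl
  | cons x t ih => simp [List.foldl_cons, ih, Function.iterate_succ_apply]

-- A's accumulator loop as a plain max-fold over the flattened candidate list
theorem pv_foldl_max_pairs (φ ψ : Nat → List Char) (l : List Nat) (a : List Char) :
    l.foldl (fun a k => max (max a (φ k)) (ψ k)) a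
      = List.foldl max a (l.flatMap (fun k => [φ k, ψ k])) := by
  induction l generalizing a with
  | nil => rfl
  | cons x t ih => simp [List.foldl_cons, ih]

theorem pv_flatMap_pairs_perm (φ ψ : Nat → List Char) (l : List Nat) :
    (l.flatMap (fun k => [φ k, ψ k])).Perm (l.map φ ++ l.map ψ) := by
  induction l with
  | nil => simp
  | cons x t ih =>
      simp only [List.flatMap_cons, List.map_cons, List.cons_append]
      refine List.Perm.trans ((ih.cons (ψ x)).cons (φ x)) ?_
      exact (List.perm_middle.symm).cons (φ x)

theorem pv_range_map_rev (n : Nat) :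
    (List.range n).map (fun k => n - 1 - k) = (List.range n).reverse := by
  apply List.ext_getElem
  · simp
  · intro i h1 h2
    simp only [List.getElem_map, List.getElem_range, List.getElem_reverse]
    simp at h1 ⊢

theorem pv_candidates_perm (s other : List Char) (n : Nat) :
    ((List.range n).flatMap (fun k => [pvF s other k, pvG s other k])).Perm
      ((List.range n).flatMap (fun k => [pvF s other k, pvG s other (n - 1 - k)])) := by
  refine (pv_flatMap_pairs_perm _ _ _).trans (List.Perm.trans ?_ (pv_flatMap_pairs_perm _ _ _).symm)
  refine List.Perm.append (List.Perm.refl _) ?_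
  have h : (List.range n).map (fun k => pvG s other (n - 1 - k))
      = ((List.range n).map (pvG s other)).reverse := by
    rw [← List.map_reverse, ← pv_range_map_rev, List.map_map]
    simp [Function.comp]
  rw [h]
  exact (List.reverse_perm _).symm

theorem pv_foldl_max_perm {l₁ l₂ : List (List Char)} (h : l₁.Perm l₂) (a : List Char) :
    List.foldl max a l₁ = List.foldl max a l₂ :=
  @List.Perm.foldl_eq _ _ max _ _ ⟨fun b x y => max_right_comm b x y⟩ h a

-- A's inner loop, characterized
theorem pv_innerA (s other a : List Char) :
    (PySem.List.pyRange 0 (PySem.Chars.len s)).foldl (fun ans j =>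
        max (max ans (PySem.List.slice s (some j) none ++ other ++ PySem.List.slice s none (some j)))
          ((PySem.List.slice s none (some j)).reverse ++ other ++ (PySem.List.slice s (some j) none).reverse)) a
      = List.foldl max a
          ((List.range s.length).flatMap (fun k => [pvF s other k, pvG s other k])) := by
  rw [show PySem.Chars.len s = (s.length : Int) from PySem.Chars.len_eq s,
      PySem.List.pyRange_zero_natCast, List.foldl_map]
  rw [← pv_foldl_max_pairs (pvF s other) (pvG s other)]
  apply PySem.List.foldl_congr_mem
  intro acc k _
  rw [PySem.List.slice_from s (a := (k : Int)) (by positivity),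
      PySem.List.slice_to s (b := (k : Int)) (by positivity)]
  simp [pvF, pvG]

-- B's loop invariant
theorem pv_innerB_inv (s other : List Char) (m : Nat) :
    ∀ (k : Nat) (a f b : List Char), k + m = s.length →
      (0 < m → f = pvF s other k ∧ b = pvG s other (s.length - 1 - k)) →
      (pvStepB^[m] (a, f, b)).1
        = List.foldl max a
            ((List.range' k m).flatMap (fun j => [pvF s other j, pvG s other (s.length - 1 - j)])) := by
  induction m with
  | zero => intro k a f b _ _; simp
  | succ m ih =>
      intro k a f b hk hfb
      obtain ⟨hf, hb⟩ := hfb (Nat.succ_pos m)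
      rw [Function.iterate_succ_apply]
      have hstep : pvStepB (a, f, b)
          = (max (max a (pvF s other k)) (pvG s other (s.length - 1 - k)), pvRot f, pvRot b) := by
        simp [pvStepB, hf, hb]
      have hcomp : 0 < m →
          pvRot f = pvF s other (k + 1) ∧ pvRot b = pvG s other (s.length - 1 - (k + 1)) := by
        intro hm
        constructor
        · rw [hf, pvRot_F s other (by omega)]
        · have hsplit : s.length - 1 - k = (s.length - 2 - k) + 1 := by omega
          rw [hb, hsplit, pvRot_G s other (by omega)]
          congr 1
          omega
      rw [hstep, ih (k + 1) _ _ _ (by omega) hcomp]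
      rw [List.range'_succ]
      simp [List.flatMap_cons]

-- B's inner loop, characterized
theorem pv_innerB (s other a : List Char) :
    ((PySem.List.pyRange 0 (PySem.Chars.len s)).foldl
        (fun st (_ : Int) =>
          (if (if st.1 < st.2.1 then st.2.1 else st.1) < st.2.2 then st.2.2
             else if st.1 < st.2.1 then st.2.1 else st.1,
           pvRot st.2.1, pvRot st.2.2))
        (a, s ++ other,
          PySem.List.slice s.reverse (some 1) none ++ other ++ PySem.List.slice s.reverse none (some 1))).1
      = List.foldl max a
          ((List.range s.length).flatMap (fun k => [pvF s other k, pvG s other (s.length - 1 - k)])) := by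
  have hfun : (fun (st : List Char × List Char × List Char) (_ : Int) =>
      ((if (if st.1 < st.2.1 then st.2.1 else st.1) < st.2.2 then st.2.2
          else if st.1 < st.2.1 then st.2.1 else st.1,
        pvRot st.2.1, pvRot st.2.2) : List Char × List Char × List Char))
      = fun st _ => pvStepB st := by
    funext st j
    simp only [pvStepB, pv_if_max]
  rw [hfun, pv_foldl_const pvStepB]
  have hlen : (PySem.List.pyRange 0 (PySem.Chars.len s)).length = s.length := by
    rw [show PySem.Chars.len s = (s.length : Int) from PySem.Chars.len_eq s,
        PySem.List.pyRange_zero_natCast]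
    simp
  rw [hlen, List.range_eq_range']
  apply pv_innerB_inv s other s.length 0 a _ _ (by omega)
  intro hn
  constructor
  · simp [pvF]
  · rw [PySem.List.slice_from s.reverse (a := 1) (by norm_num),
        PySem.List.slice_to s.reverse (b := 1) (by norm_num), pvG]
    simp only [Int.toNat_one, Nat.sub_zero, List.drop_reverse, List.take_reverse]

-- A's list-building loop is B's map
theorem pv_lst_eq (strs : List String) :
    strs.foldl (fun acc s =>
        if s.toList.reverse < s.toList then acc ++ [s.toList] else acc ++ [s.toList.reverse]) []
      = strs.map (fun s => if s.toList.reverse < s.toList then s.toList else s.toList.reverse) := by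
  have h : ∀ (acc : List (List Char)), ∀ s ∈ strs,
      (if s.toList.reverse < s.toList then acc ++ [s.toList] else acc ++ [s.toList.reverse])
        = acc ++ [if s.toList.reverse < s.toList then s.toList else s.toList.reverse] := by
    intro acc s _
    split_ifs <;> rfl
  rw [PySem.List.foldl_congr_mem _ _ _ _ h]
  have h2 := PySem.List.foldl_append_singleton_eq_map
      (fun s : String => if s.toList.reverse < s.toList then s.toList else s.toList.reverse) strs []
  simpa using h2

-- ===== VERDICT (by name: the statement is the Claim_ definition above) =====
theorem splitLoopedString_spec : Claim_equal_splitLoopedString := by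
  intro strs _
  show splitLoopedString strs = splitLoopedString_alt strs
  unfold splitLoopedString splitLoopedString_alt
  rw [pv_lst_eq]
  dsimp only
  apply congrArg
  apply PySem.List.foldl_congr_mem
  intro acc is _
  rw [pv_join_nil_append]
  rw [pv_innerA, pv_innerB]
  exact pv_foldl_max_perm (pv_candidates_perm is.2 _ is.2.length) acc
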